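-- pv_equiv track=rewrite | github.com/uj-robotics/krakrobot2016-online | simulator/misc/vegesvgplot.py | ArrayDimensions
-- ===== SOURCE A (Python) =====
-- def ArrayDimensions(MDArray):
--
--   u'''Measure the size of the array in each dimension.
--
--   If the given array is three dimensional and indexed with subscripts
--   [0…5][0…7][0…2], the result will be (6, 8, 3).
--
--   The array, which in Python is really an array of arrays if it is
--   multidimensional, is assumed to be linear, rectangular, cuboid or
--   similarly regular for higher dimensions.
--
--   An empty array has a dimension of zero.
--
--   '''
--
--   Result = []
--   Axis = MDArray
--   while hasattr(Axis, '__iter__'):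
--     Result.append(len(Axis))
--     if len(Axis) < 1:
--       break
--     Axis = Axis[0]
--   Result = tuple(Result)
--   return Result
-- ===== SOURCE B (Python) =====
-- def ArrayDimensions(MDArray):
--     # Recursive decomposition: dimensions = (len,) prepended to dimensions of first element.
--     if not hasattr(MDArray, '__iter__'):
--         return ()
--     n = len(MDArray)
--     if n < 1:
--         return (0,)
--     return (n,) + ArrayDimensions(MDArray[0])
-- ===== Notes on version B (the rewrite author's own statement) =====
-- stated objective: alternative
-- what changed: Replaced the while-loop with an accumulator list by direct structural recursion on the first element, building the tuple front-to-back as (len,) + recurse(first).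
import Mathlib
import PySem

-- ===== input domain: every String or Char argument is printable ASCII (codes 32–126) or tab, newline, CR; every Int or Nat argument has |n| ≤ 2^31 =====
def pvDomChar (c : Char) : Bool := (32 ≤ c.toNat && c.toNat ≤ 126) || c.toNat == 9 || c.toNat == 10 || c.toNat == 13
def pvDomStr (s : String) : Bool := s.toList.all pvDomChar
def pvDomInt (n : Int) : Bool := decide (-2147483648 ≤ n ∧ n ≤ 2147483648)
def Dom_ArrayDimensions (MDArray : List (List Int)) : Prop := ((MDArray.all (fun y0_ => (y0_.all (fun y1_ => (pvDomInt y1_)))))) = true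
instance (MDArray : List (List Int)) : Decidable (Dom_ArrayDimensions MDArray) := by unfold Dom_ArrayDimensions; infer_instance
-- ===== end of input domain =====

-- ===== PORT A =====
-- A: while loop over `Axis`, appending len each pass; on this two-level type the loop
-- runs at most twice (an Int has no __iter__), so the loop is unrolled literally.
def ArrayDimensions (MDArray : List (List Int)) : List Int :=
  -- pass 1: Axis = MDArray (has __iter__)
  let Result : List Int := [] ++ [(MDArray.length : Int)]
  if MDArray.length < 1 then Result  -- break
  else
    match MDArray with
    | [] => Result  -- unreachable (length ≥ 1)
    | Axis :: _ =>
      -- pass 2: Axis = MDArray[0] (has __iter__)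
      let Result := Result ++ [(Axis.length : Int)]
      -- whether we break (len < 1) or step to Axis[0] : Int (no __iter__), the loop ends
      Result

-- ===== PORT B =====
-- B: structural recursion down the first element; the recursive call chain is
-- unfolded along the type List (List Int) → List Int → Int.
def ArrayDimensions_alt_int (_Axis : Int) : List Int := []  -- int has no __iter__
def ArrayDimensions_alt_row (Axis : List Int) : List Int :=
  if Axis.length < 1 then [0]
  else match Axis with
    | [] => [0]  -- unreachable
    | x :: _ => (Axis.length : Int) :: ArrayDimensions_alt_int x
def ArrayDimensions_alt (MDArray : List (List Int)) : List Int :=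
  if MDArray.length < 1 then [0]
  else match MDArray with
    | [] => [0]  -- unreachable
    | row :: _ => (MDArray.length : Int) :: ArrayDimensions_alt_row row

-- ===== PRECONDITION & SPEC =====
def Spec_ArrayDimensions (MDArray : List (List Int)) (out : List Int) : Prop := out = ArrayDimensions_alt MDArray
instance (MDArray : List (List Int)) (out : List Int) : Decidable (Spec_ArrayDimensions MDArray out) := by unfold Spec_ArrayDimensions; infer_instance

-- ===== CLAIM (what is proved, stated in full; the proofs are below) =====
def Claim_equal_ArrayDimensions : Prop := ∀ (MDArray : List (List Int)), Dom_ArrayDimensions MDArray → Spec_ArrayDimensions MDArray (ArrayDimensions MDArray)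

-- ===== LEMMAS AND PROOFS =====

-- ===== VERDICT (by name: the statement is the Claim_ definition above) =====
theorem ArrayDimensions_spec : Claim_equal_ArrayDimensions := by
  intro MDArray _
  unfold Spec_ArrayDimensions ArrayDimensions ArrayDimensions_alt
  cases MDArray with
  | nil => simp
  | cons row rest =>
    cases row with
    | nil => simp [ArrayDimensions_alt_row]
    | cons x xs => simp [ArrayDimensions_alt_row, ArrayDimensions_alt_int]
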